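-- pv_equiv track=rewrite | github.com/RahulK847/LearningDSA | String/1stRepeatedElement.py | leftMost
-- ===== SOURCE A (Python) =====
-- def leftMost(s):
--     m = {}
--     res = -1
--     for i in range(len(s)-1, -1, -1):
--         if s[i] in m:
--             res = i
--         else:
--             m[s[i]] = i
--     return res
-- ===== SOURCE B (Python) =====
-- def leftMost(s):
--     cnt = {}
--     for c in s:
--         cnt[c] = cnt.get(c, 0) + 1
--     for i, c in enumerate(s):
--         if cnt[c] > 1:
--             return i
--     return -1
-- ===== Notes on version B (the rewrite author's own statement) =====
-- stated objective: simpler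
-- what changed: Replaces A's reverse index loop that maintains a first-seen dict and keeps overwriting a running result with a count-first pass followed by a forward scan returning at the first character whose count exceeds 1.
import Mathlib
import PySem

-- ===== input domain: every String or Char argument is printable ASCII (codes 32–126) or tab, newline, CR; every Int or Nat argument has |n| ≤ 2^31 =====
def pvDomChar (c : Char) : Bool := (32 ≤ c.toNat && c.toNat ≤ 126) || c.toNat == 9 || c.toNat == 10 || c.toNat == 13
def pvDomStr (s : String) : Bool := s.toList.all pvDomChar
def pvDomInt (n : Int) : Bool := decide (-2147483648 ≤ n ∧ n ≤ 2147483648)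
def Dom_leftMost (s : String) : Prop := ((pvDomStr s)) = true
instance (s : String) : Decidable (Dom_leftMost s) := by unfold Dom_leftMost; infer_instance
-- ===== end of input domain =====

-- B replaces A's reverse index loop (seen-dict + overwritten running result) with a count-then-forward-scan
-- two-pass shape; objective: simpler. Same return value on every input (both are total).

-- ===== PORT A =====
-- for i in range(len(s)-1, -1, -1): if s[i] in m: res = i else: m[s[i]] = i
def leftMost (s : String) : Int :=
  let l := s.toList
  ((PySem.List.pyRange ((l.length : Int) - 1) (-1) (-1)).foldl
      (fun (st : PySem.Dict Char Int × Int) (i : Int) =>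
        let c := PySem.List.pyGetD l i ' '
        if st.1.contains c then (st.1, i) else (st.1.insert c i, st.2))
      (PySem.Dict.empty, -1)).2

-- ===== PORT B =====
-- second pass of Source B: return the first enumerated index whose character counts more than once
def scanDup (cnt : PySem.Dict Char Int) : List (Int × Char) → Int
  | [] => -1
  | (i, c) :: rest => if cnt.getD c 0 > 1 then i else scanDup cnt rest

def leftMost_alt (s : String) : Int :=
  let l := s.toList
  let cnt := l.foldl (fun d c => d.insert c (d.getD c 0 + 1)) PySem.Dict.empty
  scanDup cnt (PySem.List.enumerate l 0)

-- ===== PRECONDITION & SPEC =====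
def Spec_leftMost (s : String) (out : Int) : Prop := out = leftMost_alt s
instance (s : String) (out : Int) : Decidable (Spec_leftMost s out) := by unfold Spec_leftMost; infer_instance

-- ===== CLAIM (what is proved, stated in full; the proofs are below) =====
def Claim_equal_leftMost : Prop := ∀ (s : String), Dom_leftMost s → Spec_leftMost s (leftMost s)

-- ===== LEMMAS AND PROOFS =====

-- A's result: the first index whose character occurs again further right
def firstDupIdx : List Char → Int → Int
  | [], _ => -1
  | c :: rest, k => if c ∈ rest then k else firstDupIdx rest (k + 1)

-- B's result: the first index whose character occurs more than once in the full list
def findQ (full : List Char) : List Char → Int → Int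
  | [], _ => -1
  | c :: rest, k => if 1 < full.count c then k else findQ full rest (k + 1)

-- each pair of enumerate is the list's character at its own index
lemma pyGetD_of_mem_enumerate (pre : List Char) :
    ∀ (l : List Char) (p : Int × Char), p ∈ PySem.List.enumerate l (pre.length : Int) →
      PySem.List.pyGetD (pre ++ l) p.1 ' ' = p.2 := by
  intro l
  induction l generalizing pre with
  | nil => intro p hp; simp [PySem.List.enumerate_nil] at hp
  | cons c rest ih =>
    intro p hp
    rw [PySem.List.enumerate_cons] at hp
    rcases List.mem_cons.mp hp with h | h
    · subst h
      simp [PySem.List.pyGetD_natCast, List.getD_eq_getElem?_getD]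
    · have h' : p ∈ PySem.List.enumerate rest (((pre ++ [c]).length : Nat) : Int) := by
        simpa [List.length_append, Int.add_comm] using h
      have := ih (pre ++ [c]) p h'
      simpa [List.append_assoc] using this

-- A's reverse-index fold, re-expressed as a foldr over the enumerated list
lemma leftMost_eq_foldr (s : String) :
    leftMost s =
      ((PySem.List.enumerate s.toList 0).foldr
        (fun (p : Int × Char) (st : PySem.Dict Char Int × Int) =>
          if st.1.contains p.2 then (st.1, p.1) else (st.1.insert p.2 p.1, st.2))
        (PySem.Dict.empty, -1)).2 := by
  unfold leftMost
  have hrange : PySem.List.pyRange ((s.toList.length : Int) - 1) (-1) (-1)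
      = (PySem.List.pyRange 0 (s.toList.length : Int) 1).reverse := by
    rw [PySem.List.pyRange_neg_one_eq_reverse]; norm_num
  have hmap : PySem.List.pyRange 0 (s.toList.length : Int) 1
      = (PySem.List.enumerate s.toList 0).map (·.1) := by
    rw [PySem.List.map_fst_enumerate]; norm_num
  simp only [hrange, hmap, ← List.map_reverse, List.foldl_map]
  rw [PySem.List.foldl_congr_mem _ _
      (fun (st : PySem.Dict Char Int × Int) (p : Int × Char) =>
        if st.1.contains p.2 then (st.1, p.1) else (st.1.insert p.2 p.1, st.2)) _
      (by
        intro acc p hp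
        have hp' : p ∈ PySem.List.enumerate s.toList 0 := List.mem_reverse.mp hp
        have := pyGetD_of_mem_enumerate [] s.toList p (by simpa using hp')
        simp only [List.nil_append] at this
        simp [this])]
  rw [List.foldl_reverse]

-- invariant of A's foldr: keys = seen characters, second component = firstDupIdx
lemma foldrA_inv (l : List Char) :
    ∀ (k : Int),
      (∀ c, (((PySem.List.enumerate l k).foldr
        (fun (p : Int × Char) (st : PySem.Dict Char Int × Int) =>
          if st.1.contains p.2 then (st.1, p.1) else (st.1.insert p.2 p.1, st.2))
        (PySem.Dict.empty, -1)).1.contains c) = l.contains c) ∧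
      ((PySem.List.enumerate l k).foldr
        (fun (p : Int × Char) (st : PySem.Dict Char Int × Int) =>
          if st.1.contains p.2 then (st.1, p.1) else (st.1.insert p.2 p.1, st.2))
        (PySem.Dict.empty, -1)).2 = firstDupIdx l k := by
  induction l with
  | nil =>
    intro k
    constructor
    · intro c; simp [PySem.List.enumerate_nil, PySem.Dict.contains_empty]
    · simp [PySem.List.enumerate_nil, firstDupIdx]
  | cons c rest ih =>
    intro k
    obtain ⟨hkeys, hres⟩ := ih (k + 1)
    rw [PySem.List.enumerate_cons]
    simp only [List.foldr_cons, hkeys c]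
    by_cases hmem : c ∈ rest
    · have hc : rest.contains c = true := List.elem_eq_true_of_mem hmem
      simp only [hc, if_true]
      constructor
      · intro c'
        rw [hkeys c', List.contains_cons]
        cases h : c' == c
        · simp
        · have hcc : c' = c := by simpa using h
          subst hcc; simp [hmem]
      · simp [firstDupIdx, hmem]
    · have hc : rest.contains c = false := by
        simpa using hmem
      simp only [hc, Bool.false_eq_true, if_false]
      constructor
      · intro c'
        rw [PySem.Dict.contains_insert, hkeys c', List.contains_cons]
      · simpa [firstDupIdx, hmem] using hres

-- B's scan over the enumerated list is findQ once the dict holds the full counts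
lemma scanDup_eq_findQ (full : List Char) (cnt : PySem.Dict Char Int)
    (h : ∀ c, cnt.getD c 0 = (full.count c : Int)) :
    ∀ (t : List Char) (k : Int), scanDup cnt (PySem.List.enumerate t k) = findQ full t k := by
  intro t
  induction t with
  | nil => intro k; simp [PySem.List.enumerate_nil, scanDup, findQ]
  | cons c rest ih =>
    intro k
    rw [PySem.List.enumerate_cons]
    simp only [scanDup, findQ, h c]
    by_cases hcnt : 1 < full.count c
    · rw [if_pos (by exact_mod_cast hcnt), if_pos hcnt]
    · rw [if_neg (by exact_mod_cast hcnt), if_neg hcnt, ih]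

-- B's port equals findQ over the string's characters
lemma leftMost_alt_eq_findQ (s : String) :
    leftMost_alt s = findQ s.toList s.toList 0 := by
  unfold leftMost_alt
  refine scanDup_eq_findQ s.toList _ (fun c => ?_) s.toList 0
  rw [PySem.Dict.getD_foldl_insert_add_one]
  simp [PySem.Dict.getD_empty]

-- the two scans agree: the first later-duplicate index is the first count>1 index,
-- provided every character already passed is unique in the full list
lemma firstDupIdx_eq_findQ :
    ∀ (t pre : List Char) (k : Int), (∀ c ∈ pre, (pre ++ t).count c ≤ 1) →
      firstDupIdx t k = findQ (pre ++ t) t k := by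
  intro t
  induction t with
  | nil => intro pre k _; simp [firstDupIdx, findQ]
  | cons c rest ih =>
    intro pre k hpre
    simp only [firstDupIdx, findQ]
    by_cases hmem : c ∈ rest
    · rw [if_pos hmem, if_pos]
      have h1 : 1 ≤ rest.count c := List.one_le_count_iff.mpr hmem
      have h2 : 2 ≤ (c :: rest).count c := by
        rw [List.count_cons_self]; omega
      have h3 : (c :: rest).count c ≤ (pre ++ c :: rest).count c := by
        rw [List.count_append]; omega
      omega
    · rw [if_neg hmem]
      have hle : (pre ++ c :: rest).count c ≤ 1 := by
        by_cases hp : c ∈ pre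
        · exact hpre c hp
        · rw [List.count_append, List.count_cons_self,
            List.count_eq_zero_of_not_mem hp, List.count_eq_zero_of_not_mem hmem]
      rw [if_neg (by omega)]
      have := ih (pre ++ [c]) (k + 1) (by
        intro c' hc'
        rw [List.append_assoc]
        simp only [List.singleton_append]
        rcases List.mem_append.mp hc' with h | h
        · exact hpre c' h
        · simp only [List.mem_singleton] at h; subst h; exact hle)
      simpa [List.append_assoc] using this

-- ===== VERDICT (by name: the statement is the Claim_ definition above) =====
theorem leftMost_spec : Claim_equal_leftMost := by
  intro s _
  unfold Spec_leftMost
  have h := firstDupIdx_eq_findQ s.toList [] 0 (by intro c hc; simp at hc)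
  simp only [List.nil_append] at h
  rw [leftMost_eq_foldr s, (foldrA_inv s.toList 0).2, leftMost_alt_eq_findQ s, h]
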